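-- pv_equiv track=rewrite | github.com/jideedu/SKILLVET_APP | allfuctions.py | unpackGroupByResult
-- ===== SOURCE A (Python) =====
-- def unpackGroupByResult(data):
--     Broken, Partial, Complete =[],[],[]
--     finalresult = {}
--     for key, value in data.items():
--         cat, trace = key
--         if trace == 'B':
--             Broken.append((cat, value))
--         elif trace == 'P':
--             Partial.append((cat, value))
--         elif trace == 'C':
--             Complete.append((cat, value))
--     finalresult ['C']= Complete
--     finalresult ['P']= Partial
--     finalresult ['B']= Broken
--     return finalresult
-- ===== SOURCE B (Python) =====
-- def unpackGroupByResult(data):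
--     return {t: [(cat, value) for (cat, trace), value in data.items() if trace == t]
--             for t in ('C', 'P', 'B')}
-- ===== Notes on version B (the rewrite author's own statement) =====
-- stated objective: simpler
-- what changed: Replaces the single-pass if/elif bucketing loop with three accumulators by a dict comprehension of three independent filtered scans, one per trace letter.
import Mathlib
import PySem

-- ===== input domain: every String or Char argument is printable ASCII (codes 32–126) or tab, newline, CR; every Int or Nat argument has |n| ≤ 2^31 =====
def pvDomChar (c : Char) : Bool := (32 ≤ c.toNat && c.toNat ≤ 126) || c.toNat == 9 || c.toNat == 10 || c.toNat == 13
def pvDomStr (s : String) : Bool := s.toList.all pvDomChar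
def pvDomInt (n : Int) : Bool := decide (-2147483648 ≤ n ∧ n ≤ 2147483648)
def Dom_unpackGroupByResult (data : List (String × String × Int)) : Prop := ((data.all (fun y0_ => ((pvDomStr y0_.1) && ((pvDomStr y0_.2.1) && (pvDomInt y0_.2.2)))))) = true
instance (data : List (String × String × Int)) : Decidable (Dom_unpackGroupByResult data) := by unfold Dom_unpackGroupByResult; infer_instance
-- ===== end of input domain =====

-- ===== PORT A =====
-- literal port of A: one fold over the items with three accumulator lists, then the three dict insertions
def unpackGroupByResult (data : List (String × String × Int)) : List (String × List (String × Int)) :=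
  let st := data.foldl
    (fun (acc : List (String × Int) × List (String × Int) × List (String × Int)) kv =>
      let cat := kv.1
      let trace := kv.2.1
      let value := kv.2.2
      if trace = "B" then (acc.1 ++ [(cat, value)], acc.2.1, acc.2.2)
      else if trace = "P" then (acc.1, acc.2.1 ++ [(cat, value)], acc.2.2)
      else if trace = "C" then (acc.1, acc.2.1, acc.2.2 ++ [(cat, value)])
      else acc)
    ([], [], [])
  [("C", st.2.2), ("P", st.2.1), ("B", st.1)]

-- ===== PORT B =====
-- port of B: a comprehension over the three trace letters, each a filtered scan of data
def unpackGroupByResult_alt (data : List (String × String × Int)) : List (String × List (String × Int)) :=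
  ["C", "P", "B"].map
    (fun t => (t, (data.filter (fun kv => kv.2.1 = t)).map (fun kv => (kv.1, kv.2.2))))

-- ===== PRECONDITION & SPEC =====
def Spec_unpackGroupByResult (data : List (String × String × Int)) (out : List (String × List (String × Int))) : Prop := out = unpackGroupByResult_alt data
instance (data : List (String × String × Int)) (out : List (String × List (String × Int))) : Decidable (Spec_unpackGroupByResult data out) := by unfold Spec_unpackGroupByResult; infer_instance

-- ===== CLAIM (what is proved, stated in full; the proofs are below) =====
def Claim_equal_unpackGroupByResult : Prop := ∀ (data : List (String × String × Int)), Dom_unpackGroupByResult data → Spec_unpackGroupByResult data (unpackGroupByResult data)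

-- ===== LEMMAS AND PROOFS =====

-- ===== VERDICT (by name: the statement is the Claim_ definition above) =====
def pvProj (t : String) (data : List (String × String × Int)) : List (String × Int) :=
  (data.filter (fun kv => kv.2.1 = t)).map (fun kv => (kv.1, kv.2.2))

lemma pvFold_eq (data : List (String × String × Int))
    (b p c : List (String × Int)) :
    data.foldl
      (fun (acc : List (String × Int) × List (String × Int) × List (String × Int)) kv =>
        let cat := kv.1
        let trace := kv.2.1
        let value := kv.2.2
        if trace = "B" then (acc.1 ++ [(cat, value)], acc.2.1, acc.2.2)
        else if trace = "P" then (acc.1, acc.2.1 ++ [(cat, value)], acc.2.2)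
        else if trace = "C" then (acc.1, acc.2.1, acc.2.2 ++ [(cat, value)])
        else acc)
      (b, p, c)
    = (b ++ pvProj "B" data, p ++ pvProj "P" data, c ++ pvProj "C" data) := by
  induction data generalizing b p c with
  | nil => simp [pvProj]
  | cons kv rest ih =>
    simp only [List.foldl_cons]
    by_cases hB : kv.2.1 = "B"
    · simp [hB, ih, pvProj, List.append_assoc]
    · by_cases hP : kv.2.1 = "P"
      · simp [hB, hP, ih, pvProj, List.append_assoc]
      · by_cases hC : kv.2.1 = "C"
        · simp [hB, hP, hC, ih, pvProj, List.append_assoc]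
        · simp [hB, hP, hC, ih, pvProj]

theorem unpackGroupByResult_spec : Claim_equal_unpackGroupByResult := by
  intro data _
  unfold Spec_unpackGroupByResult unpackGroupByResult unpackGroupByResult_alt
  simp [pvFold_eq data [] [] [], pvProj]
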